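-- pv_equiv track=rewrite | github.com/cofiem/music-playlists | music_playlists/intermediate/manage.py | _different_spellings
-- ===== SOURCE A (Python) =====
-- def _different_spellings(title: str):
--     spellings = {
--         "crying": ["cryin"],
--     }
--     title_split = title.split(" ")
--     for replacement, alternates in spellings.items():
--         for alternate in alternates:
--             for index, word in enumerate(title_split):
--                 if alternate == word:
--                     title_split[index] = replacement
--     return " ".join(title_split)
-- ===== SOURCE B (Python) =====
-- def _different_spellings(title: str):
--     spellings = {
--         "crying": ["cryin"],
--     }
--     lookup = {alt: rep for rep, alts in spellings.items() for alt in alts}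
--     return " ".join(lookup.get(word, word) for word in title.split(" "))
-- ===== Notes on version B (the rewrite author's own statement) =====
-- stated objective: idiomatic
-- what changed: B inverts the spellings dict once into an alternate->replacement lookup table and makes a single pass over the split words with lookup.get, replacing A's three nested loops that rescan and mutate the word list per alternate.
import Mathlib
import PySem

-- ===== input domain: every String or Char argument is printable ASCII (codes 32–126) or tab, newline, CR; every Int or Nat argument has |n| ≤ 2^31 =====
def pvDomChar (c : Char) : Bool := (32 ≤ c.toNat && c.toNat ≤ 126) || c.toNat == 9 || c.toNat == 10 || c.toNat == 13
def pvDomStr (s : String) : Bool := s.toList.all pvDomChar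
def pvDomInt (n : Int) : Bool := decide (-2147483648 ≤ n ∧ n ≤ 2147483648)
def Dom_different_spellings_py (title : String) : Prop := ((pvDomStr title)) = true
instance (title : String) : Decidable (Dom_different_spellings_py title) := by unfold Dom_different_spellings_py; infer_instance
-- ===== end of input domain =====

-- B builds the alternate->replacement lookup once and maps the words in one pass,
-- replacing A's per-alternate enumerate-and-mutate scans; same return value (objective: idiomatic).

-- ===== PORT A =====
-- A: spellings dict; split on " "; for each (replacement, alternates), for each alternate,
-- enumerate the word list and overwrite matching positions in place; join with " ".
def different_spellings_py (title : String) : String :=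
  let spellings : PySem.Dict String (List String) :=
    (PySem.Dict.empty).insert "crying" ["cryin"]
  let title_split := (PySem.Str.split? title " ").getD []
  let title_split :=
    spellings.items.foldl (fun ts ra =>
      ra.2.foldl (fun ts alternate =>
        (PySem.List.enumerate ts).foldl (fun ts iw =>
          if alternate == iw.2 then PySem.List.pySetD ts iw.1 ra.1 else ts) ts) ts) title_split
  PySem.Str.join " " title_split

-- ===== PORT B =====
-- B: invert the spellings dict into a lookup table, then one pass over the words.
def different_spellings_py_alt (title : String) : String :=
  let spellings : PySem.Dict String (List String) :=
    (PySem.Dict.empty).insert "crying" ["cryin"]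
  let lookup : PySem.Dict String String :=
    spellings.items.foldl (fun d ra =>
      ra.2.foldl (fun d alt => d.insert alt ra.1) d) PySem.Dict.empty
  PySem.Str.join " " (((PySem.Str.split? title " ").getD []).map (fun word => lookup.getD word word))

-- ===== PRECONDITION & SPEC =====
def Spec_different_spellings_py (title : String) (out : String) : Prop := out = different_spellings_py_alt title
instance (title : String) (out : String) : Decidable (Spec_different_spellings_py title out) := by unfold Spec_different_spellings_py; infer_instance

-- ===== CLAIM (what is proved, stated in full; the proofs are below) =====
def Claim_equal_different_spellings_py : Prop := ∀ (title : String), Dom_different_spellings_py title → Spec_different_spellings_py title (different_spellings_py title)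

-- ===== LEMMAS AND PROOFS =====

-- ===== VERDICT (by name: the statement is the Claim_ definition above) =====
-- A's enumerate-and-set pass over one alternate equals a map over the list.
lemma setFold_eq_map (ts pre : List String) :
    (PySem.List.enumerate ts (pre.length : Int)).foldl
      (fun acc iw => if "cryin" == iw.2 then PySem.List.pySetD acc iw.1 "crying" else acc)
      (pre ++ ts)
    = pre ++ ts.map (fun w => if w == "cryin" then "crying" else w) := by
  induction ts generalizing pre with
  | nil => simp [PySem.List.enumerate_nil]
  | cons x xs ih =>
    rw [PySem.List.enumerate_cons]
    simp only [List.foldl_cons]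
    by_cases hx : x = "cryin"
    · subst hx
      have hset : PySem.List.pySetD (pre ++ "cryin" :: xs) (pre.length : Int) "crying"
          = (pre ++ ["crying"]) ++ xs := by
        simp [PySem.List.pySetD, PySem.List.pySet?, PySem.List.pyIdx?, List.set_append]
      have h1 : ((pre.length : Int) + 1) = (((pre ++ ["crying"]).length : Int)) := by
        simp
      simp only [beq_self_eq_true, if_true, hset, h1]
      rw [ih (pre ++ ["crying"])]
      simp
    · have hb : ("cryin" == x) = false := by
        simp [beq_eq_false_iff_ne]; exact fun h => hx h.symm
      have h1 : ((pre.length : Int) + 1) = (((pre ++ [x]).length : Int)) := by simp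
      rw [hb]
      simp only [Bool.false_eq_true, if_false, h1]
      have := ih (pre ++ [x])
      rw [List.append_cons pre x xs, this]
      simp [hx]

theorem different_spellings_py_spec : Claim_equal_different_spellings_py := by
  intro title _
  unfold Spec_different_spellings_py different_spellings_py different_spellings_py_alt
  have hitems : (((PySem.Dict.empty).insert "crying" ["cryin"] :
      PySem.Dict String (List String)).items) = [("crying", ["cryin"])] := rfl
  have := setFold_eq_map ((PySem.Str.split? title " ").getD []) []
  simp only [List.length_nil, Nat.cast_zero, List.nil_append] at this
  simp only [hitems, List.foldl_cons, List.foldl_nil]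
  rw [this]
  congr 1
  apply List.map_congr_left
  intro w _
  by_cases hw : w = "cryin"
  · simp [hw, PySem.Dict.getD, PySem.Dict.get?, PySem.Dict.insert, PySem.Dict.empty]
  · simp [PySem.Dict.getD, PySem.Dict.get?, PySem.Dict.insert, PySem.Dict.empty, Ne.symm hw]
    exact fun h => absurd h hw
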